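-- pv_equiv track=rewrite | github.com/amnakhawaja04/LMKR-ChatBot | RAG/working.py | build_dynamic_sources
-- ===== SOURCE A (Python) =====
-- def build_dynamic_sources(context_chunks):
--     urls = []
--     files = []
--
--     for c in context_chunks:
--         meta = c.get("metadata", {})
--         if meta.get("source_url"):
--             urls.append(meta["source_url"])
--         if meta.get("source_file"):
--             files.append(meta["source_file"])
--
--     return {
--         "urls": list(dict.fromkeys(urls)),
--         "files": list(dict.fromkeys(files))
--     }
-- ===== SOURCE B (Python) =====
-- def build_dynamic_sources(context_chunks):
--     urls = []
--     files = []
--     seen_urls = set()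
--     seen_files = set()
--
--     for c in context_chunks:
--         meta = c.get("metadata", {})
--         u = meta.get("source_url")
--         if u and u not in seen_urls:
--             seen_urls.add(u)
--             urls.append(u)
--         f = meta.get("source_file")
--         if f and f not in seen_files:
--             seen_files.add(f)
--             files.append(f)
--
--     return {"urls": urls, "files": files}
-- ===== Notes on version B (the rewrite author's own statement) =====
-- stated objective: alternative
-- what changed: B deduplicates on the fly with two 'seen' sets inside the single collection loop, returning the result lists directly, instead of A's collect-everything-then-dedup via dict.fromkeys.
import Mathlib
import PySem

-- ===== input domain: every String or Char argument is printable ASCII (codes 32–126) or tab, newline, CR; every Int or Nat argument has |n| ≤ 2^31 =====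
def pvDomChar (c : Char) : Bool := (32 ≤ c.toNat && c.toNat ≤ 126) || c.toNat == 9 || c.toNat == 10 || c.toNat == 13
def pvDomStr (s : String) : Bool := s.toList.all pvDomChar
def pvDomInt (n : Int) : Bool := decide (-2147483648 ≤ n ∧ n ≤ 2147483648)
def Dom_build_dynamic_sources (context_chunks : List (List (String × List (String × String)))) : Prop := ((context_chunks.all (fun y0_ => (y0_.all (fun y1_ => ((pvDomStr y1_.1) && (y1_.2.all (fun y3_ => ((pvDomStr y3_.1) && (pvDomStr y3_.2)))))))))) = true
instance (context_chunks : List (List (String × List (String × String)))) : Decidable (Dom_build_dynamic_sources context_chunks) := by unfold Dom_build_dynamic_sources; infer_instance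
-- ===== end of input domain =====

-- B deduplicates on the fly with two 'seen' sets inside the single collection loop (returning the
-- result lists directly), instead of A's collect-everything-then-dedup via dict.fromkeys; objective: alternative.

-- ===== PORT A =====
-- loop body of A: append raw (possibly duplicated) values
def bdsStepA (acc : List String × List String) (c : List (String × List (String × String))) :
    List String × List String :=
  let md := (PySem.Dict.mk c).getD "metadata" []
  -- 'if md.get("source_url"):' — a missing key or "" is falsy
  let acc := if (PySem.Dict.mk md).getD "source_url" "" ≠ "" then
      (acc.1 ++ [(PySem.Dict.mk md).getD "source_url" ""], acc.2) else acc
  if (PySem.Dict.mk md).getD "source_file" "" ≠ "" then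
      (acc.1, acc.2 ++ [(PySem.Dict.mk md).getD "source_file" ""]) else acc

def build_dynamic_sources (context_chunks : List (List (String × List (String × String)))) :
    List (String × List String) :=
  let acc := context_chunks.foldl bdsStepA ([], [])
  [("urls", PySem.List.dedup acc.1), ("files", PySem.List.dedup acc.2)]

-- ===== PORT B =====
-- loop body of B: state (urls, files, seen_urls, seen_files); append only unseen values
def bdsStepB (st : List String × List String × PySem.Set String × PySem.Set String)
    (c : List (String × List (String × String))) :
    List String × List String × PySem.Set String × PySem.Set String :=
  let urls := st.1; let files := st.2.1; let seenU := st.2.2.1; let seenF := st.2.2.2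
  let md := (PySem.Dict.mk c).getD "metadata" []
  let u := (PySem.Dict.mk md).getD "source_url" ""
  let (urls, seenU) := if u ≠ "" ∧ ¬ seenU.contains u then (urls ++ [u], seenU.add u) else (urls, seenU)
  let f := (PySem.Dict.mk md).getD "source_file" ""
  let (files, seenF) := if f ≠ "" ∧ ¬ seenF.contains f then (files ++ [f], seenF.add f) else (files, seenF)
  (urls, files, seenU, seenF)

def build_dynamic_sources_alt (context_chunks : List (List (String × List (String × String)))) :
    List (String × List String) :=
  let st := context_chunks.foldl bdsStepB ([], [], [], [])
  [("urls", st.1), ("files", st.2.1)]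

-- ===== PRECONDITION & SPEC =====
def Spec_build_dynamic_sources (context_chunks : List (List (String × List (String × String)))) (out : List (String × List String)) : Prop := out = build_dynamic_sources_alt context_chunks
instance (context_chunks : List (List (String × List (String × String)))) (out : List (String × List String)) : Decidable (Spec_build_dynamic_sources context_chunks out) := by unfold Spec_build_dynamic_sources; infer_instance

-- ===== CLAIM (what is proved, stated in full; the proofs are below) =====
def Claim_equal_build_dynamic_sources : Prop := ∀ (context_chunks : List (List (String × List (String × String)))), Dom_build_dynamic_sources context_chunks → Spec_build_dynamic_sources context_chunks (build_dynamic_sources context_chunks)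

-- ===== LEMMAS AND PROOFS =====

-- the url/file extracted from one chunk ("" = absent/falsy)
def bdsUrl (c : List (String × List (String × String))) : String :=
  (PySem.Dict.mk ((PySem.Dict.mk c).getD "metadata" [])).getD "source_url" ""
def bdsFile (c : List (String × List (String × String))) : String :=
  (PySem.Dict.mk ((PySem.Dict.mk c).getD "metadata" [])).getD "source_file" ""

-- the raw (with duplicates) lists A collects
def bdsColU : List (List (String × List (String × String))) → List String
  | [] => []
  | c :: cs => (if bdsUrl c ≠ "" then [bdsUrl c] else []) ++ bdsColU cs
def bdsColF : List (List (String × List (String × String))) → List String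
  | [] => []
  | c :: cs => (if bdsFile c ≠ "" then [bdsFile c] else []) ++ bdsColF cs

theorem bds_foldlA (cs : List (List (String × List (String × String))))
    (us fs : List String) :
    cs.foldl bdsStepA (us, fs) = (us ++ bdsColU cs, fs ++ bdsColF cs) := by
  induction cs generalizing us fs with
  | nil => simp [bdsColU, bdsColF]
  | cons c cs ih =>
    simp only [List.foldl_cons, bdsStepA, bdsColU, bdsColF]
    by_cases hu : bdsUrl c ≠ "" <;> by_cases hf : bdsFile c ≠ "" <;>
      simp [bdsUrl, bdsFile] at hu hf ⊢ <;>
      simp [hu, hf, ih, List.append_assoc]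

theorem bds_stepB (u f : PySem.Set String) (c : List (String × List (String × String))) :
    bdsStepB (u, f, u, f) c =
      ((if bdsUrl c ≠ "" then PySem.Set.add u (bdsUrl c) else u),
       (if bdsFile c ≠ "" then PySem.Set.add f (bdsFile c) else f),
       (if bdsUrl c ≠ "" then PySem.Set.add u (bdsUrl c) else u),
       (if bdsFile c ≠ "" then PySem.Set.add f (bdsFile c) else f)) := by
  simp only [bdsStepB, bdsUrl, bdsFile]
  by_cases hu : (PySem.Dict.mk ((PySem.Dict.mk c).getD "metadata" [])).getD "source_url" "" ≠ "" <;>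
    by_cases hcu : PySem.Set.contains u ((PySem.Dict.mk ((PySem.Dict.mk c).getD "metadata" [])).getD "source_url" "") = true <;>
    by_cases hf : (PySem.Dict.mk ((PySem.Dict.mk c).getD "metadata" [])).getD "source_file" "" ≠ "" <;>
    by_cases hcf : PySem.Set.contains f ((PySem.Dict.mk ((PySem.Dict.mk c).getD "metadata" [])).getD "source_file" "") = true <;>
    simp [hu, hcu, hf, hcf, PySem.Set.add] <;> split_ifs <;> simp_all

theorem bds_foldlB (cs : List (List (String × List (String × String))))
    (u f : PySem.Set String) :
    cs.foldl bdsStepB (u, f, u, f) =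
      (PySem.Set.update u (bdsColU cs), PySem.Set.update f (bdsColF cs),
       PySem.Set.update u (bdsColU cs), PySem.Set.update f (bdsColF cs)) := by
  induction cs generalizing u f with
  | nil => simp [bdsColU, bdsColF, PySem.Set.update]
  | cons c cs ih =>
    simp only [List.foldl_cons, bds_stepB, ih, bdsColU, bdsColF, PySem.Set.update]
    by_cases hu : bdsUrl c ≠ "" <;> by_cases hf : bdsFile c ≠ "" <;>
      simp [hu, hf]

-- ===== VERDICT (by name: the statement is the Claim_ definition above) =====
theorem build_dynamic_sources_spec : Claim_equal_build_dynamic_sources := by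
  intro cs _
  unfold Spec_build_dynamic_sources build_dynamic_sources build_dynamic_sources_alt
  rw [bds_foldlA, bds_foldlB]
  simp [PySem.Set.update, ← PySem.Set.ofList_eq_foldl]
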